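-- pv_equiv track=rewrite | github.com/Mac-Adam/Advent_Calendar | 2023/day12/day12.py | islands_after
-- ===== SOURCE A (Python) =====
-- def islands_after(data):
--     island = False
--     curr = 0
--     res = [0] * len(data)
--     for i in reversed(range(len(data))):
--         if data[i] == "#":
--             island = True
--         else:
--             if island:
--                 curr += 1
--             island = False
--         res[i] = curr
--     return res
-- ===== SOURCE B (Python) =====
-- def islands_after(data):
--     n = len(data)
--     total = sum(1 for j in range(n) if j >= 1 and data[j] == "#" and data[j-1] != "#")
--     res = []
--     seen = 0
--     for j in range(n):
--         if j >= 1 and data[j] == "#" and data[j-1] != "#":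
--             seen += 1
--         res.append(total - seen)
--     return res
-- ===== Notes on version B (the rewrite author's own statement) =====
-- stated objective: alternative
-- what changed: Replaces the single right-to-left accumulator loop writing into a preallocated array with a two-pass left-to-right count-total-then-subtract-prefix scheme: first count all group starts (a '#' whose left neighbour is not '#', index >= 1), then emit total minus the running number of starts seen so far.
import Mathlib
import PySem

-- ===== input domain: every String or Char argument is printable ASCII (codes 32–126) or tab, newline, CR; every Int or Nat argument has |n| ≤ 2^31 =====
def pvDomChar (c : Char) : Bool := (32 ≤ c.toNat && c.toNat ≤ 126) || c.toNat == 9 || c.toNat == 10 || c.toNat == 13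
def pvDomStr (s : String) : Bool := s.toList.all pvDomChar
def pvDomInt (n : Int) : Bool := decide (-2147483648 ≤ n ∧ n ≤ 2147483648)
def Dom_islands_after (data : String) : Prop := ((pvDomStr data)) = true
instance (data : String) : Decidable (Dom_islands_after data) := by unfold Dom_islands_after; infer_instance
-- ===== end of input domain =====

-- B replaces A's single right-to-left accumulator loop by two left-to-right passes:
-- count all group starts, then subtract a running prefix count. Same cost, different decomposition.

-- data[i] for an in-range index i (exact there; ' ' is never consulted in range)
def chr (cs : List Char) (i : Nat) : Char := cs.getD i ' '

-- ===== PORT A =====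
-- loop body of A's for-loop (state: island flag, curr counter, res list)
def fA (cs : List Char) (st : Bool × Int × List Int) (i : Nat) : Bool × Int × List Int :=
  if chr cs i = '#' then (true, st.2.1, st.2.2.set i st.2.1)
  else if st.1 then (false, st.2.1 + 1, st.2.2.set i (st.2.1 + 1))
  else (false, st.2.1, st.2.2.set i st.2.1)

def islands_after (data : String) : List Int :=
  let cs := data.toList
  let n := cs.length
  (((List.range n).reverse).foldl (fA cs) (false, 0, List.replicate n (0 : Int))).2.2

-- ===== PORT B =====
-- "j >= 1 and data[j] == '#' and data[j-1] != '#'" : index j starts a '#'-group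
def startB (cs : List Char) (j : Nat) : Bool :=
  decide (1 ≤ j) && decide (chr cs j = '#') && decide (chr cs (j-1) ≠ '#')

-- loop body of B's second pass (state: seen counter, result list)
def gB (total : Int) (cs : List Char) (st : Int × List Int) (j : Nat) : Int × List Int :=
  let seen := if startB cs j then st.1 + 1 else st.1
  (seen, st.2 ++ [total - seen])

def islands_after_alt (data : String) : List Int :=
  let cs := data.toList
  let n := cs.length
  let total : Int := ((List.range n).filter (startB cs)).length
  ((List.range n).foldl (gB total cs) (0, [])).2

-- ===== PRECONDITION & SPEC =====
def Spec_islands_after (data : String) (out : List Int) : Prop := out = islands_after_alt data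
instance (data : String) (out : List Int) : Decidable (Spec_islands_after data out) := by unfold Spec_islands_after; infer_instance

-- ===== CLAIM (what is proved, stated in full; the proofs are below) =====
def Claim_equal_islands_after : Prop := ∀ (data : String), Dom_islands_after data → Spec_islands_after data (islands_after data)

-- ===== LEMMAS AND PROOFS =====

-- number of group starts among indices [0, k)
def sCnt (cs : List Char) (k : Nat) : Nat := ((List.range k).filter (startB cs)).length

theorem sCnt_one (cs : List Char) : sCnt cs 1 = 0 := by
  simp [sCnt, List.range_succ, startB]

theorem sCnt_succ (cs : List Char) (k : Nat) :
    sCnt cs (k+1) = sCnt cs k + (if startB cs k then 1 else 0) := by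
  simp only [sCnt, List.range_succ, List.filter_append, List.length_append]
  split <;> simp_all

theorem chr_len (cs : List Char) : chr cs cs.length = ' ' := by
  simp [chr]

theorem sCnt_len_succ (cs : List Char) : sCnt cs (cs.length + 1) = sCnt cs cs.length := by
  rw [sCnt_succ]
  simp [startB, chr_len]

-- invariant of A's loop after processing indices m-1, …, 0
theorem invA (cs : List Char) (m : Nat) (hm : m ≤ cs.length) :
    ∀ (curr : Int) (res : List Int), res.length = cs.length →
    ((((List.range m).reverse).foldl (fA cs) (decide (chr cs m = '#'), curr, res)).1
        = decide (chr cs 0 = '#')) ∧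
    ((((List.range m).reverse).foldl (fA cs) (decide (chr cs m = '#'), curr, res)).2.1
        = curr + (sCnt cs (m+1) : Int)) ∧
    (∀ i : Nat,
      ((((List.range m).reverse).foldl (fA cs) (decide (chr cs m = '#'), curr, res)).2.2)[i]?
        = if i < m then some (curr + ((sCnt cs (m+1) : Int) - (sCnt cs (i+1) : Int)))
          else res[i]?) := by
  induction m with
  | zero =>
      intro curr res hres
      simp [sCnt_one]
  | succ m ih =>
      intro curr res hres
      have hstep : (List.range (m+1)).reverse = m :: (List.range m).reverse := by
        rw [List.range_succ, List.reverse_append]; rfl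
      rw [hstep]
      simp only [List.foldl_cons]
      have hmlt : m < cs.length := hm
      have hrlen : ∀ v : Int, (res.set m v).length = cs.length := by
        intro v; simp [hres]
      by_cases hch : chr cs m = '#'
      · -- branch 1: data[m] == '#'
        have hfa : fA cs (decide (chr cs (m+1) = '#'), curr, res) m
            = (decide (chr cs m = '#'), curr, res.set m curr) := by
          simp only [fA]; rw [if_pos hch]; simp [hch]
        rw [hfa]
        obtain ⟨h1, h2, h3⟩ := ih (Nat.le_of_lt hmlt) curr (res.set m curr) (hrlen curr)
        have hs2 : sCnt cs (m+2) = sCnt cs (m+1) := by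
          rw [sCnt_succ]; simp [startB, hch]
        refine ⟨h1, by rw [h2, hs2], ?_⟩
        intro i
        rw [h3 i]
        rcases lt_trichotomy i m with h | h | h
        · simp [h, Nat.lt_succ_of_lt h, hs2]
        · subst h
          rw [if_neg (lt_irrefl i), if_pos (Nat.lt_succ_self i),
            List.getElem?_set_self (by omega)]
          rw [hs2]; simp
        · have h1' : ¬ i < m := Nat.not_lt.mpr (Nat.le_of_lt h)
          have h2' : ¬ i < m + 1 := Nat.not_lt.mpr h
          rw [if_neg h1', if_neg h2', List.getElem?_set_ne (Nat.ne_of_lt h)]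
      · -- data[m] != '#'
        by_cases hisl : chr cs (m+1) = '#'
        · -- island was set: increment curr, index m+1 is a group start
          have hfa : fA cs (decide (chr cs (m+1) = '#'), curr, res) m
              = (decide (chr cs m = '#'), curr + 1, res.set m (curr + 1)) := by
            simp only [fA]; rw [if_neg hch]; simp [hch, hisl]
          rw [hfa]
          obtain ⟨h1, h2, h3⟩ := ih (Nat.le_of_lt hmlt) (curr + 1) (res.set m (curr + 1)) (hrlen _)
          have hs2 : sCnt cs (m+2) = sCnt cs (m+1) + 1 := by
            rw [sCnt_succ]; simp [startB, hch, hisl]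
          refine ⟨h1, by rw [h2, hs2]; push_cast; ring, ?_⟩
          intro i
          rw [h3 i]
          rcases lt_trichotomy i m with h | h | h
          · rw [if_pos h, if_pos (Nat.lt_succ_of_lt h), hs2]
            congr 1; push_cast; ring
          · subst h
            rw [if_neg (lt_irrefl i), if_pos (Nat.lt_succ_self i),
              List.getElem?_set_self (by omega)]
            rw [hs2]; congr 1; push_cast; ring
          · have h1' : ¬ i < m := Nat.not_lt.mpr (Nat.le_of_lt h)
            have h2' : ¬ i < m + 1 := Nat.not_lt.mpr h
            rw [if_neg h1', if_neg h2', List.getElem?_set_ne (Nat.ne_of_lt h)]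
        · -- island was clear: nothing to count
          have hfa : fA cs (decide (chr cs (m+1) = '#'), curr, res) m
              = (decide (chr cs m = '#'), curr, res.set m curr) := by
            simp only [fA]; rw [if_neg hch]; simp [hch, hisl]
          rw [hfa]
          obtain ⟨h1, h2, h3⟩ := ih (Nat.le_of_lt hmlt) curr (res.set m curr) (hrlen curr)
          have hs2 : sCnt cs (m+2) = sCnt cs (m+1) := by
            rw [sCnt_succ]; simp [startB, hisl]
          refine ⟨h1, by rw [h2, hs2], ?_⟩
          intro i
          rw [h3 i]
          rcases lt_trichotomy i m with h | h | h
          · simp [h, Nat.lt_succ_of_lt h, hs2]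
          · subst h
            rw [if_neg (lt_irrefl i), if_pos (Nat.lt_succ_self i),
              List.getElem?_set_self (by omega)]
            rw [hs2]; simp
          · have h1' : ¬ i < m := Nat.not_lt.mpr (Nat.le_of_lt h)
            have h2' : ¬ i < m + 1 := Nat.not_lt.mpr h
            rw [if_neg h1', if_neg h2', List.getElem?_set_ne (Nat.ne_of_lt h)]

-- A computes total-minus-prefix of group-start counts
theorem A_closed (data : String) :
    islands_after data
      = (List.range data.toList.length).map
          (fun i => (sCnt data.toList data.toList.length : Int) - (sCnt data.toList (i+1) : Int)) := by
  set cs := data.toList with hcs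
  have hinit : (false : Bool) = decide (chr cs cs.length = '#') := by
    rw [chr_len]; simp
  obtain ⟨h1, h2, h3⟩ :=
    invA cs cs.length (le_refl _) 0 (List.replicate cs.length (0 : Int)) (by simp)
  apply List.ext_getElem?
  intro i
  show (((List.range cs.length).reverse.foldl (fA cs)
      (false, 0, List.replicate cs.length (0 : Int))).2.2)[i]? = _
  rw [hinit, h3 i]
  by_cases h : i < cs.length
  · simp [h, sCnt_len_succ]
  · simp [h]

-- B's second pass computes the same map
theorem B_fold (cs : List Char) (total : Int) (n : Nat) :
    (List.range n).foldl (gB total cs) (0, [])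
      = ((sCnt cs n : Int), (List.range n).map (fun j => total - (sCnt cs (j+1) : Int))) := by
  induction n with
  | zero => rfl
  | succ n ih =>
      rw [List.range_succ, List.foldl_append, List.map_append, ih]
      simp only [List.foldl_cons, List.foldl_nil, gB, List.map_cons, List.map_nil]
      rw [sCnt_succ]
      by_cases h : startB cs n
      · simp [h]
      · simp [h]

theorem B_closed (data : String) :
    islands_after_alt data
      = (List.range data.toList.length).map
          (fun i => (sCnt data.toList data.toList.length : Int) - (sCnt data.toList (i+1) : Int)) := by
  show ((List.range data.toList.length).foldl
      (gB (((List.range data.toList.length).filter (startB data.toList)).length : Int) data.toList)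
      (0, [])).2 = _
  rw [B_fold]
  rfl

-- ===== VERDICT (by name: the statement is the Claim_ definition above) =====
theorem islands_after_spec : Claim_equal_islands_after := by
  intro data _
  unfold Spec_islands_after
  rw [A_closed, B_closed]
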